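-- pv_equiv track=rewrite | github.com/MyStraw/BAEKJOON | 백준/Silver/13022. 늑대와 올바른 단어/늑대와 올바른 단어.py | check
-- ===== SOURCE A (Python) =====
-- def check(word):
--     i = 0
--     n = len(word)
--     while i < n:
--         if word[i] != 'w':
--             return False
--         cnt = 0
--         while i < n and word[i] == 'w':
--             cnt += 1
--             i += 1
--         for ch in 'olf':
--             c = 0
--             while i < n and word[i] == ch:
--                 c += 1
--                 i += 1
--             if c != cnt:
--                 return False
--     return True
-- ===== SOURCE B (Python) =====
-- def check(word):
--     # Run-length-encode the word, then verify the runs come in (w,o,l,f)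
--     # quadruples with equal lengths within each quadruple.
--     runs = []
--     for ch in word:
--         if runs and runs[-1][0] == ch:
--             runs[-1] = (ch, runs[-1][1] + 1)
--         else:
--             runs.append((ch, 1))
--     while runs:
--         if len(runs) < 4:
--             return False
--         (c0, n0), (c1, n1), (c2, n2), (c3, n3) = runs[:4]
--         if (c0, c1, c2, c3) != ('w', 'o', 'l', 'f') or not (n0 == n1 == n2 == n3):
--             return False
--         runs = runs[4:]
--     return True
-- ===== Notes on version B (the rewrite author's own statement) =====
-- stated objective: alternative
-- what changed: A validates in one pass with an index and nested while-loops counting each character run in place; B first builds a run-length encoding of the word and then checks the run list in quadruples (w,o,l,f) with equal lengths per quadruple.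
import Mathlib
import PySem

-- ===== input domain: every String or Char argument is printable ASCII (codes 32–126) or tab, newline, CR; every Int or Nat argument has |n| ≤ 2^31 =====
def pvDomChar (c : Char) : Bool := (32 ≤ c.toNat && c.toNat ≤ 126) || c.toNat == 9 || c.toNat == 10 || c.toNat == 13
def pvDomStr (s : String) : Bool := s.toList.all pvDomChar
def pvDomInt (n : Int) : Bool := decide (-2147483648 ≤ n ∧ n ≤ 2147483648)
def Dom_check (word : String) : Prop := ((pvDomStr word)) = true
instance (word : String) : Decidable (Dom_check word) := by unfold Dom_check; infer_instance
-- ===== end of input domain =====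

-- B re-implements A by run-length encoding first, then checking the runs in
-- (w,o,l,f) quadruples of equal lengths; same O(n) cost, different decomposition.

-- ===== PORT A =====
-- A scans with an index i; the port models position i by the remaining suffix.
-- countRun ports `while i < n and word[i] == ch: cnt += 1; i += 1`.
def countRun (ch : Char) : List Char → Nat × List Char
  | [] => (0, [])
  | c :: rest =>
    if c = ch then
      let p := countRun ch rest
      (p.1 + 1, p.2)
    else (0, c :: rest)

lemma countRun_snd_length_le (ch : Char) : ∀ cs : List Char, (countRun ch cs).2.length ≤ cs.length
  | [] => le_refl _
  | c :: rest => by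
    simp only [countRun]
    split
    · exact le_trans (countRun_snd_length_le ch rest) (Nat.le_succ _)
    · exact le_refl _

-- ports `for ch in 'olf': …; if c != cnt: return False` (none = early False)
def olfLoop (cnt : Nat) : List Char → List Char → Option (List Char)
  | [], cs => some cs
  | ch :: chs, cs =>
    let p := countRun ch cs
    if p.1 ≠ cnt then none else olfLoop cnt chs p.2

lemma olfLoop_length_le (cnt : Nat) :
    ∀ (chs cs r : List Char), olfLoop cnt chs cs = some r → r.length ≤ cs.length
  | [], cs, r => by
    simp only [olfLoop, Option.some.injEq]
    rintro rfl; exact le_refl _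
  | ch :: chs, cs, r => by
    simp only [olfLoop]
    split
    · intro h; cases h
    · intro h
      exact le_trans (olfLoop_length_le cnt chs _ r h) (countRun_snd_length_le ch cs)

-- ports A's outer `while i < n:` loop
def checkLoop (cs : List Char) : Bool :=
  match cs with
  | [] => true
  | c :: rest =>
    if c ≠ 'w' then false
    else
      let p := countRun 'w' (c :: rest)
      match h : olfLoop p.1 ['o', 'l', 'f'] p.2 with
      | none => false
      | some r => checkLoop r
termination_by cs.length
decreasing_by
  simp only [ne_eq, not_not] at *
  have h1 : r.length ≤ (countRun 'w' (c :: rest)).2.length :=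
    olfLoop_length_le _ _ _ _ h
  have h2 : (countRun 'w' (c :: rest)).2.length ≤ rest.length := by
    subst_vars
    simp only [countRun, if_pos rfl]
    exact countRun_snd_length_le _ rest
  simp only [List.length_cons]
  omega

def check (word : String) : Bool := checkLoop word.toList

-- ===== PORT B =====
-- builds the run-length encoding (ports B's first for-loop over word)
def rleGo (prev : Char) (cnt : Nat) : List Char → List (Char × Nat)
  | [] => [(prev, cnt)]
  | c :: cs => if c = prev then rleGo prev (cnt + 1) cs else (prev, cnt) :: rleGo c 1 cs

def rle : List Char → List (Char × Nat)
  | [] => []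
  | c :: cs => rleGo c 1 cs

-- ports B's `while runs:` loop taking the runs four at a time
def checkRuns : List (Char × Nat) → Bool
  | [] => true
  | (c0, n0) :: (c1, n1) :: (c2, n2) :: (c3, n3) :: rest =>
    if c0 = 'w' ∧ c1 = 'o' ∧ c2 = 'l' ∧ c3 = 'f' ∧ n0 = n1 ∧ n1 = n2 ∧ n2 = n3 then
      checkRuns rest
    else false
  | _ => false

def check_alt (word : String) : Bool := checkRuns (rle word.toList)

-- ===== PRECONDITION & SPEC =====
def Spec_check (word : String) (out : Bool) : Prop := out = check_alt word
instance (word : String) (out : Bool) : Decidable (Spec_check word out) := by unfold Spec_check; infer_instance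

-- ===== CLAIM (what is proved, stated in full; the proofs are below) =====
def Claim_equal_check : Prop := ∀ (word : String), Dom_check word → Spec_check word (check word)

-- ===== LEMMAS AND PROOFS =====

lemma countRun_head_ne (ch : Char) (cs : List Char) (h : cs.head? ≠ some ch) :
    countRun ch cs = (0, cs) := by
  cases cs with
  | nil => rfl
  | cons c rest =>
    simp only [List.head?_cons, ne_eq, Option.some.injEq] at h
    simp [countRun, h]

lemma countRun_decomp (ch : Char) :
    ∀ cs : List Char,
      cs = List.replicate (countRun ch cs).1 ch ++ (countRun ch cs).2 ∧
      (countRun ch cs).2.head? ≠ some ch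
  | [] => by simp [countRun]
  | c :: rest => by
    by_cases hc : c = ch
    · subst hc
      obtain ⟨h1, h2⟩ := countRun_decomp c rest
      simp only [countRun, if_pos rfl]
      refine ⟨?_, h2⟩
      conv_lhs => rw [h1]
      simp [List.replicate_succ]
    · simp [countRun, hc]

lemma countRun_replicate_append (ch : Char) (r : List Char) (hr : r.head? ≠ some ch) :
    ∀ n : Nat, countRun ch (List.replicate n ch ++ r) = (n, r)
  | 0 => by simpa using countRun_head_ne ch r hr
  | n + 1 => by
    simp [List.replicate_succ, countRun, countRun_replicate_append ch r hr n]

lemma rleGo_eq :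
    ∀ (cs : List Char) (ch : Char) (cnt : Nat),
      rleGo ch cnt cs = (ch, cnt + (countRun ch cs).1) :: rle (countRun ch cs).2
  | [], ch, cnt => by simp [rleGo, countRun, rle]
  | c :: cs, ch, cnt => by
    by_cases hc : c = ch
    · subst hc
      have h1 : rleGo c cnt (c :: cs) = rleGo c (cnt + 1) cs := by simp [rleGo]
      have h2 : countRun c (c :: cs) = ((countRun c cs).1 + 1, (countRun c cs).2) := by
        simp [countRun]
      rw [h1, rleGo_eq cs c (cnt + 1), h2]
      simp [Nat.add_comm, Nat.add_left_comm, Nat.add_assoc]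
    · have h2 : countRun ch (c :: cs) = (0, c :: cs) := by simp [countRun, hc]
      rw [h2]
      simp [rleGo, hc, rle]

lemma rle_cons (c : Char) (cs : List Char) :
    rle (c :: cs) = (c, 1 + (countRun c cs).1) :: rle (countRun c cs).2 := by
  rw [show rle (c :: cs) = rleGo c 1 cs from rfl, rleGo_eq]

lemma rle_replicate_append (ch : Char) (n : Nat) (r : List Char)
    (hn : 1 ≤ n) (hr : r.head? ≠ some ch) :
    rle (List.replicate n ch ++ r) = (ch, n) :: rle r := by
  obtain ⟨m, rfl⟩ : ∃ m, n = m + 1 := ⟨n - 1, by omega⟩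
  rw [List.replicate_succ, List.cons_append, rle_cons,
    countRun_replicate_append ch r hr m]
  simp [Nat.add_comm]

lemma olfLoop_some (cnt : Nat) (hcnt : 1 ≤ cnt) :
    ∀ (chs cs r : List Char), olfLoop cnt chs cs = some r →
      rle cs = chs.map (fun c => (c, cnt)) ++ rle r
  | [], cs, r => by
    simp only [olfLoop, Option.some.injEq, List.map_nil, List.nil_append]
    rintro rfl; rfl
  | ch :: chs, cs, r => by
    simp only [olfLoop]
    split
    · intro h; cases h
    · intro h
      rename_i hne
      simp only [ne_eq, not_not] at hne
      obtain ⟨hdec, hhead⟩ := countRun_decomp ch cs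
      have hrle : rle cs = (ch, cnt) :: rle (countRun ch cs).2 := by
        conv_lhs => rw [hdec]
        rw [rle_replicate_append ch _ _ (by omega) hhead, hne]
      rw [hrle, olfLoop_some cnt hcnt chs _ r h]
      simp

lemma olfLoop_of_rle (cnt : Nat) (hcnt : 1 ≤ cnt) :
    ∀ (chs cs : List Char) (rest : List (Char × Nat)),
      rle cs = chs.map (fun c => (c, cnt)) ++ rest →
      ∃ r, olfLoop cnt chs cs = some r ∧ rle r = rest
  | [], cs, rest => by
    intro h
    exact ⟨cs, rfl, by simpa using h⟩
  | ch :: chs, cs, rest => by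
    intro h
    cases cs with
    | nil => simp [rle] at h
    | cons c cs' =>
      rw [rle_cons] at h
      simp only [List.map_cons, List.cons_append, List.cons.injEq, Prod.mk.injEq] at h
      obtain ⟨⟨rfl, hn⟩, htail⟩ := h
      have hcr : countRun c (c :: cs') = ((countRun c cs').1 + 1, (countRun c cs').2) := by
        simp [countRun]
      obtain ⟨r, hr1, hr2⟩ := olfLoop_of_rle cnt hcnt chs (countRun c cs').2 rest htail
      refine ⟨r, ?_, hr2⟩
      simp only [olfLoop, hcr]
      rw [if_neg (by omega)]
      exact hr1

lemma checkRuns_w_iff (cnt : Nat) (rs : List (Char × Nat)) :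
    checkRuns (('w', cnt) :: rs) = true ↔
      ∃ rest, rs = ('o', cnt) :: ('l', cnt) :: ('f', cnt) :: rest ∧ checkRuns rest = true := by
  rcases rs with _ | ⟨⟨c1, n1⟩, _ | ⟨⟨c2, n2⟩, _ | ⟨⟨c3, n3⟩, rest⟩⟩⟩
  · simp [checkRuns]
  · simp [checkRuns]
  · simp [checkRuns]
  · constructor
    · intro h
      simp only [checkRuns] at h
      split at h
      · rename_i hcond
        obtain ⟨_, rfl, rfl, rfl, h01, h12, h23⟩ := hcond
        exact ⟨rest, by simp_all, h⟩
      · cases h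
    · rintro ⟨rest', heq, hrest⟩
      simp only [List.cons.injEq, Prod.mk.injEq] at heq
      obtain ⟨⟨rfl, rfl⟩, ⟨rfl, rfl⟩, ⟨rfl, rfl⟩, rfl⟩ := heq
      simp [checkRuns, hrest]

lemma checkRuns_head_ne_w (c : Char) (n : Nat) (rs : List (Char × Nat)) (hc : c ≠ 'w') :
    checkRuns ((c, n) :: rs) = false := by
  rcases rs with _ | ⟨⟨c1, n1⟩, _ | ⟨⟨c2, n2⟩, _ | ⟨⟨c3, n3⟩, rest⟩⟩⟩
  · rfl
  · rfl
  · rfl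
  · simp [checkRuns, hc]

lemma checkLoop_eq_checkRuns_rle :
    ∀ (n : Nat) (cs : List Char), cs.length ≤ n → checkLoop cs = checkRuns (rle cs) := by
  intro n
  induction n with
  | zero =>
    intro cs hcs
    have : cs = [] := List.eq_nil_of_length_eq_zero (Nat.le_zero.mp hcs)
    subst this
    rw [checkLoop]; rfl
  | succ n ih =>
    intro cs hcs
    cases cs with
    | nil => rw [checkLoop]; rfl
    | cons c cs' =>
      by_cases hc : c = 'w'
      · subst hc
        rw [checkLoop]
        simp only [ne_eq, not_true_eq_false, if_false, ite_false, reduceIte]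
        have hp : countRun 'w' ('w' :: cs') = ((countRun 'w' cs').1 + 1, (countRun 'w' cs').2) := by
          simp [countRun]
        set k := (countRun 'w' cs').1 with hk
        set r1 := (countRun 'w' cs').2 with hr1
        have hrle : rle ('w' :: cs') = ('w', 1 + k) :: rle r1 := rle_cons 'w' cs'
        have hcnt : 1 ≤ k + 1 := by omega
        rcases holf : olfLoop (countRun 'w' ('w' :: cs')).1 ['o', 'l', 'f']
            (countRun 'w' ('w' :: cs')).2 with _ | r
        · -- olfLoop failed: both sides false
          rw [hp] at holf
          rw [hrle]
          rcases hB : checkRuns (('w', 1 + k) :: rle r1) with _ | _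
          · rfl
          · exfalso
            rw [show (1 + k) = k + 1 by omega] at hB
            obtain ⟨rest, hrest, _⟩ := (checkRuns_w_iff (k + 1) (rle r1)).mp hB
            obtain ⟨r, hr, _⟩ := olfLoop_of_rle (k + 1) hcnt ['o', 'l', 'f'] r1 rest
              (by simpa using hrest)
            rw [holf] at hr; cases hr
        · -- olfLoop succeeded with remainder r
          rw [hp] at holf
          have hlen : r.length ≤ n := by
            have h1 : r.length ≤ r1.length := olfLoop_length_le _ _ _ _ holf
            have h2 : r1.length ≤ cs'.length := by
              rw [hr1]; exact countRun_snd_length_le _ cs'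
            simp only [List.length_cons] at hcs
            omega
          show checkLoop r = _
          rw [ih r hlen, hrle]
          have hdecomp : rle r1 = ('o', k + 1) :: ('l', k + 1) :: ('f', k + 1) :: rle r := by
            simpa using olfLoop_some (k + 1) hcnt ['o', 'l', 'f'] r1 r holf
          rw [hdecomp, show (1 + k) = k + 1 by omega]
          simp [checkRuns]
      · rw [checkLoop]
        simp only [ne_eq, hc, not_false_eq_true, if_true, ite_true, reduceIte]
        rw [rle_cons, checkRuns_head_ne_w _ _ _ hc]

-- ===== VERDICT (by name: the statement is the Claim_ definition above) =====
theorem check_spec : Claim_equal_check := by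
  intro word _
  unfold Spec_check check check_alt
  exact checkLoop_eq_checkRuns_rle word.toList.length word.toList (le_refl _)
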